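-- pv_equiv track=rewrite | github.com/Hebbe1234/ExpectAll | src/fast_rsa_heuristic.py | and_based_on_a_path
-- ===== SOURCE A (Python) =====
-- def and_based_on_a_path(edge_to_utlized, path):
--     res_vector = []
--     first = True
--     for e in path:
--         if first:
--             res_vector = edge_to_utlized[e]
--             first = False
--         else:
--             res_vector = [a and b for a,b in zip(edge_to_utlized[e], res_vector)]
--     return res_vector
-- ===== SOURCE B (Python) =====
-- def and_based_on_a_path(edge_to_utlized, path):
--     vectors = [edge_to_utlized[e] for e in path]
--     if not vectors:
--         return []
--     res = []
--     for col in zip(*vectors):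
--         acc = col[0]
--         for nxt in col[1:]:
--             acc = nxt and acc
--         res.append(acc)
--     return res
-- ===== Notes on version B (the rewrite author's own statement) =====
-- stated objective: alternative
-- what changed: B collects the path's vectors once, transposes them with zip(*vectors), and folds each column to one bit, instead of A's rebuilding of a full accumulator vector per edge.
import Mathlib
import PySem

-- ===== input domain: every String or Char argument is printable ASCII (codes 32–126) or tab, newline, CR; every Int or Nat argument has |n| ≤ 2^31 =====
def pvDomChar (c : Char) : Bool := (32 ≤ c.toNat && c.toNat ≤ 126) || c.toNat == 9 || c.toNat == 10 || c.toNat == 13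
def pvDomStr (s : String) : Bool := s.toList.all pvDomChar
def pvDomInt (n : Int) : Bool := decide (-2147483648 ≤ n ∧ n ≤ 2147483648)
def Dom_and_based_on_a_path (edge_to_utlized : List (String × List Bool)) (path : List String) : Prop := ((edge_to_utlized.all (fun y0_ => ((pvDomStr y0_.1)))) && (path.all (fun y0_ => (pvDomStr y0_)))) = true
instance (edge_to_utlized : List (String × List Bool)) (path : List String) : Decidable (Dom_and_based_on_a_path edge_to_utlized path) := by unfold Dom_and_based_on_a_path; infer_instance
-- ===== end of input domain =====

-- B folds each transposed column to one bit instead of rebuilding a whole accumulator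
-- vector per edge (objective: alternative decomposition, same cost).

-- ===== PORT A =====
-- dict lookup edge_to_utlized[e]: first match in the association list; default [] is
-- never reached inside Pre_ (Python raises KeyError there).
def pvLookup (edge_to_utlized : List (String × List Bool)) (e : String) : List Bool :=
  (List.lookup e edge_to_utlized).getD []

def and_based_on_a_path (edge_to_utlized : List (String × List Bool)) (path : List String) : List Bool :=
  (path.foldl
    (fun (st : List Bool × Bool) e =>
      if st.2 then (pvLookup edge_to_utlized e, false)
      else (((pvLookup edge_to_utlized e).zip st.1).map (fun p => p.1 && p.2), false))
    (([] : List Bool), true)).1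

-- ===== PORT B =====
-- number of columns of zip(*vectors): the minimum vector length (0 columns for no vectors)
def pvMinLen : List (List Bool) → Nat
  | [] => 0
  | v :: rest => rest.foldl (fun m w => min m w.length) v.length

-- zip(*vectors): column j is the j-th entry of every vector
def pvZipStar (vectors : List (List Bool)) : List (List Bool) :=
  (List.range (pvMinLen vectors)).map (fun j => vectors.map (fun v => v.getD j false))

-- inner loop of B: acc = col[0]; for nxt in col[1:]: acc = nxt and acc
def pvColAnd : List Bool → Bool
  | [] => false
  | c :: rest => rest.foldl (fun acc nxt => nxt && acc) c

def and_based_on_a_path_alt (edge_to_utlized : List (String × List Bool)) (path : List String) : List Bool :=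
  let vectors := path.map (fun e => pvLookup edge_to_utlized e)
  if vectors.isEmpty then []
  else (pvZipStar vectors).map pvColAnd

-- ===== PRECONDITION & SPEC =====
-- Pre_ excludes exactly the inputs where some path element is not a key of the dict:
-- there Python A raises KeyError.
def Pre_and_based_on_a_path (edge_to_utlized : List (String × List Bool)) (path : List String) : Prop :=
  ∀ e ∈ path, (List.lookup e edge_to_utlized).isSome
instance (edge_to_utlized : List (String × List Bool)) (path : List String) : Decidable (Pre_and_based_on_a_path edge_to_utlized path) := by unfold Pre_and_based_on_a_path; infer_instance

def pvWitness_and_based_on_a_path : (List (String × List Bool)) × List String :=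
  ([("a", [true, false]), ("b", [false, true])], ["a", "b"])

def Spec_and_based_on_a_path (edge_to_utlized : List (String × List Bool)) (path : List String) (out : List Bool) : Prop := out = and_based_on_a_path_alt edge_to_utlized path
instance (edge_to_utlized : List (String × List Bool)) (path : List String) (out : List Bool) : Decidable (Spec_and_based_on_a_path edge_to_utlized path out) := by unfold Spec_and_based_on_a_path; infer_instance

-- ===== CLAIM (what is proved, stated in full; the proofs are below) =====
def Claim_equal_and_based_on_a_path : Prop := ∀ (edge_to_utlized : List (String × List Bool)) (path : List String), Dom_and_based_on_a_path edge_to_utlized path → Pre_and_based_on_a_path edge_to_utlized path → Spec_and_based_on_a_path edge_to_utlized path (and_based_on_a_path edge_to_utlized path)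

-- ===== LEMMAS AND PROOFS =====

-- A's accumulator-update step, over the looked-up vectors
def pvStep (res w : List Bool) : List Bool := (w.zip res).map (fun p => p.1 && p.2)

-- the pair state of A's fold keeps 'first = false' after the first element
theorem pvFoldPair (d : List (String × List Bool)) (l : List String) (res : List Bool) :
    (l.foldl
      (fun (st : List Bool × Bool) e =>
        if st.2 then (pvLookup d e, false)
        else (((pvLookup d e).zip st.1).map (fun p => p.1 && p.2), false))
      (res, false)).1
    = l.foldl (fun r e => pvStep r (pvLookup d e)) res := by
  induction l generalizing res with
  | nil => rfl
  | cons e t ih => simp [List.foldl_cons, pvStep, ih]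

theorem pvFoldMinLe (vs : List (List Bool)) (a : Nat) :
    vs.foldl (fun m w => min m w.length) a ≤ a := by
  induction vs generalizing a with
  | nil => exact le_rfl
  | cons w t ih => exact le_trans (ih (min a w.length)) (Nat.min_le_left _ _)

-- length of A's fold = min of all vector lengths
theorem pvLenFold (vs : List (List Bool)) (res : List Bool) :
    (vs.foldl pvStep res).length = vs.foldl (fun m w => min m w.length) res.length := by
  induction vs generalizing res with
  | nil => rfl
  | cons w t ih =>
    simp only [List.foldl_cons]
    rw [ih]
    have : (pvStep res w).length = min res.length w.length := by
      simp [pvStep, Nat.min_comm]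
    rw [this]

-- element j of A's fold = per-index fold across the vectors
theorem pvElemFold (vs : List (List Bool)) (res : List Bool) (j : Nat)
    (hj : j < vs.foldl (fun m w => min m w.length) res.length) :
    (vs.foldl pvStep res).getD j false
      = vs.foldl (fun acc w => w.getD j false && acc) (res.getD j false) := by
  induction vs generalizing res with
  | nil => rfl
  | cons w t ih =>
    simp only [List.foldl_cons] at hj ⊢
    have hmin : j < min res.length w.length := lt_of_lt_of_le hj (pvFoldMinLe t _)
    have hr : j < res.length := lt_of_lt_of_le hmin (Nat.min_le_left _ _)
    have hw : j < w.length := lt_of_lt_of_le hmin (Nat.min_le_right _ _)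
    have hstep : (pvStep res w).getD j false = (w.getD j false && res.getD j false) := by
      have hz : j < (w.zip res).length := by simp [List.length_zip]; omega
      have : j < (pvStep res w).length := by simp [pvStep, List.length_zip]; omega
      rw [List.getD_eq_getElem _ _ this]
      simp [pvStep, List.getD_eq_getElem?_getD, List.getElem?_eq_getElem hr, List.getElem?_eq_getElem hw]
    have hj' : j < t.foldl (fun m w => min m w.length) (pvStep res w).length := by
      have : (pvStep res w).length = min res.length w.length := by
        simp [pvStep, Nat.min_comm]
      rw [this]; exact hj
    rw [ih _ hj', hstep]

-- ===== VERDICT (by name: the statement is the Claim_ definition above) =====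
theorem and_based_on_a_path_spec : Claim_equal_and_based_on_a_path := by
  intro d path _ _
  unfold Spec_and_based_on_a_path and_based_on_a_path and_based_on_a_path_alt
  cases path with
  | nil => rfl
  | cons e rest =>
    simp only [List.foldl_cons, if_pos, List.map_cons, List.isEmpty_cons, if_neg,
      Bool.false_eq_true, not_false_iff]
    rw [pvFoldPair]
    have hfm : rest.foldl (fun r e => pvStep r (pvLookup d e)) (pvLookup d e)
        = (rest.map (pvLookup d)).foldl pvStep (pvLookup d e) := by
      rw [List.foldl_map]
    rw [hfm]
    set v := pvLookup d e with hv
    set vs := rest.map (pvLookup d) with hvs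
    have hn : pvMinLen (v :: vs) = vs.foldl (fun m w => min m w.length) v.length := rfl
    apply List.ext_getElem
    · simp [pvZipStar, pvLenFold, hn]
    · intro j h1 h2
      have hjn : j < pvMinLen (v :: vs) := by
        rw [hn]; rw [pvLenFold] at h1; exact h1
      have lhs : ((rest.map (pvLookup d)).foldl pvStep v)[j]'h1
          = (vs.foldl pvStep v).getD j false := by
        rw [List.getD_eq_getElem _ _ h1]
      rw [lhs, pvElemFold vs v j (by rw [← hn]; exact hjn)]
      -- right side: element j of the mapped columns
      have hrhs : ((pvZipStar (v :: vs)).map pvColAnd)[j]'h2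
          = pvColAnd ((v :: vs).map (fun w => w.getD j false)) := by
        simp [pvZipStar]
      rw [hrhs]
      simp only [List.map_cons, pvColAnd, List.foldl_map]
-- ===== end =====
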